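-- pv_equiv track=rewrite | github.com/robwec/book-printing-bookbinding-pdf-page-order | assemble-printbook.py | make25FoldPageOrder_printfold
-- ===== SOURCE A (Python) =====
-- import math
--
-- def make25FoldPageOrder_printfold(n, folio_size = 25):
-- 	finished_layout = {}
-- 	max_printsheets = math.ceil(n/8)
-- 	for i in range(1, max_printsheets+1):
-- 		finished_layout[i] = {"front":{"top_left":-1, "top_right":-1, "bottom_left":-1, "bottom_right":-1}, "back":{"top_left":-1, "top_right":-1, "bottom_left":-1, "bottom_right":-1}}
-- 	foldgroups = list(range(0, n))[::folio_size*8]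
-- 	num_folios = len(foldgroups)
-- 	currentpagenum = 0
-- 	folio_num = 0
-- 	currentprintsheetnum = 0
-- 	back = "back"
-- 	top = "top"
-- 	left = "right"
-- 	while currentpagenum <= n:
-- 		#if currentpagenum % (8*folio_size) == 0:
-- 		folio_num += 1
-- 		currentpagenum = 8*folio_size*(folio_num-1) + 1
-- 		maxoksheet = min(folio_size*folio_num, max_printsheets)
-- 		currentprintsheetnum = maxoksheet
-- 		minoksheet = folio_size*(folio_num-1)+1
-- 		#do it in groups of 8
-- 		#stack direction: bottom to top, top left front (up from back at bottom of stack)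
-- 		while currentprintsheetnum >= minoksheet:
-- 			if currentpagenum > n:
-- 				break
-- 			finished_layout[currentprintsheetnum]["back"]["top_right"] = currentpagenum
-- 			currentpagenum += 1
-- 			if currentpagenum > n:
-- 				break
-- 			finished_layout[currentprintsheetnum]["front"]["top_left"] = currentpagenum
-- 			currentpagenum += 1
-- 			currentprintsheetnum -= 1
-- 		currentprintsheetnum = minoksheet
-- 		#stack direction: top to bottom, top right side front.
-- 		while currentprintsheetnum <= maxoksheet:
-- 			if currentpagenum > n:
-- 				break
-- 			finished_layout[currentprintsheetnum]["front"]["top_right"] = currentpagenum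
-- 			currentpagenum += 1
-- 			if currentpagenum > n:
-- 				break
-- 			finished_layout[currentprintsheetnum]["back"]["top_left"] = currentpagenum
-- 			currentpagenum += 1
-- 			currentprintsheetnum += 1
-- 		currentprintsheetnum = maxoksheet
-- 		#stack direction: bottom to top, bottom left side up from back.
-- 		while currentprintsheetnum >= minoksheet:
-- 			if currentpagenum > n:
-- 				break
-- 			finished_layout[currentprintsheetnum]["back"]["bottom_right"] = currentpagenum
-- 			currentpagenum += 1
-- 			if currentpagenum > n:
-- 				break
-- 			finished_layout[currentprintsheetnum]["front"]["bottom_left"] = currentpagenum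
-- 			currentpagenum += 1
-- 			currentprintsheetnum -= 1
-- 		currentprintsheetnum = minoksheet
-- 		#stack direction: top to bottom, bottom right side front to back.
-- 		while currentprintsheetnum <= maxoksheet:
-- 			if currentpagenum > n:
-- 				break
-- 			finished_layout[currentprintsheetnum]["front"]["bottom_right"] = currentpagenum
-- 			currentpagenum += 1
-- 			if currentpagenum > n:
-- 				break
-- 			finished_layout[currentprintsheetnum]["back"]["bottom_left"] = currentpagenum
-- 			currentpagenum += 1
-- 			currentprintsheetnum += 1
-- 	return finished_layout
-- ===== SOURCE B (Python) =====
-- import math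
--
-- def make25FoldPageOrder_printfold(n, folio_size=25):
--     max_printsheets = math.ceil(n/8)
--     def pg(p):
--         return p if p <= n else -1
--     layout = {}
--     for s in range(1, max_printsheets+1):
--         g = (s-1)//folio_size
--         lo = folio_size*g + 1
--         hi = min(folio_size*(g+1), max_printsheets)
--         num = hi - lo + 1
--         base = 8*folio_size*g + 1
--         down = 2*(hi - s)
--         up = 2*(s - lo)
--         layout[s] = {
--             "front": {"top_left": pg(base+down+1), "top_right": pg(base+2*num+up),
--                       "bottom_left": pg(base+4*num+down+1), "bottom_right": pg(base+6*num+up)},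
--             "back": {"top_left": pg(base+2*num+up+1), "top_right": pg(base+down),
--                      "bottom_left": pg(base+6*num+up+1), "bottom_right": pg(base+4*num+down)},
--         }
--     return layout
-- ===== Notes on version B (the rewrite author's own statement) =====
-- stated objective: alternative
-- what changed: B replaces A's outer while-loop with four nested phase while-loops threading a mutable page counter by a single pass over the sheets that computes each of the eight slot page numbers of a sheet in closed form from its fold group (g=(s-1)//folio_size, lo, hi, num) and clamps pages beyond n to the -1 default.
import Mathlib
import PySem

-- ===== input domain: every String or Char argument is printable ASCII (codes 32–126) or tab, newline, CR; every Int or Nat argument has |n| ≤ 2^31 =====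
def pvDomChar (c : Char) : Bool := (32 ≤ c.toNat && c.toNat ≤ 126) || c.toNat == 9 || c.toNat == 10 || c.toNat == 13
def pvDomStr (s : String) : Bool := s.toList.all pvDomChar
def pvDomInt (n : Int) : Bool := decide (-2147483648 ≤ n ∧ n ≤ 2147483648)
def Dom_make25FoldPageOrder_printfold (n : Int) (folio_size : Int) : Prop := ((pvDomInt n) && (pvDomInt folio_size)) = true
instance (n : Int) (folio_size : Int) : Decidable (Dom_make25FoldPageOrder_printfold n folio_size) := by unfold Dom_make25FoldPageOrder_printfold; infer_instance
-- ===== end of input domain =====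

-- B assigns each printsheet's eight slot page numbers by closed-form fold-group arithmetic in one
-- pass over the sheets, instead of A's four page-by-page stack-walking while-loops per fold group
-- (objective: alternative — same O(n) cost, different algorithm).


-- ===== PORT A =====

abbrev PvSheet := List (String × List (String × Int))

def pvInitSheet : PvSheet :=
  [("front", [("top_left", -1), ("top_right", -1), ("bottom_left", -1), ("bottom_right", -1)]),
   ("back",  [("top_left", -1), ("top_right", -1), ("bottom_left", -1), ("bottom_right", -1)])]

def pvUpdSlot (sl : List (String × Int)) (corner : String) (v : Int) : List (String × Int) :=
  sl.map (fun q => if q.1 = corner then (q.1, v) else q)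

def pvUpdSheet (sh : PvSheet) (side corner : String) (v : Int) : PvSheet :=
  sh.map (fun p => if p.1 = side then (p.1, pvUpdSlot p.2 corner v) else p)

-- finished_layout[s][side][corner] = v : in-place overwrite of an existing key (keys here are
-- always present and unique, so the positional map is Python-dict exact)
def pvSet (d : List (Int × PvSheet)) (s : Int) (side corner : String) (v : Int) :
    List (Int × PvSheet) :=
  d.map (fun kv => if kv.1 = s then (kv.1, pvUpdSheet kv.2 side corner v) else kv)

-- one inner 'while currentprintsheetnum ...' loop of A; the four loops are textually identical up
-- to direction (asc) and the two side/corner string pairs, so they share this transliteration.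
-- fuel = number of sheets in the group = the loop's exact iteration bound; running out of fuel
-- returns the state exactly like the loop condition turning false.
def pvPhase (n : Int) (asc : Bool) (bnd : Int) (s1 c1 s2 c2 : String) :
    Nat → List (Int × PvSheet) × Int × Int → List (Int × PvSheet) × Int × Int
  | 0, st => st
  | fuel+1, (d, cp, s) =>
    if (if asc then s ≤ bnd else bnd ≤ s) then
      if n < cp then (d, cp, s)
      else
        let d1 := pvSet d s s1 c1 cp
        if n < cp + 1 then (d1, cp + 1, s)
        else
          let d2 := pvSet d1 s s2 c2 (cp + 1)
          pvPhase n asc bnd s1 c1 s2 c2 fuel (d2, cp + 2, if asc then s + 1 else s - 1)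
    else (d, cp, s)

-- the outer 'while currentpagenum <= n' loop; fn is folio_num.  fuel n.toNat + 2 is an upper
-- bound on the iteration count wherever the Python terminates (proved below); outside Pre_ the
-- Python diverges and nothing is claimed.
def pvOuter (n fs maxps : Int) : Nat → List (Int × PvSheet) → Int → Int → List (Int × PvSheet)
  | 0, d, _, _ => d
  | fuel+1, d, cp, fn =>
    if cp ≤ n then
      let fn1 := fn + 1
      let cp1 := 8*fs*(fn1-1) + 1
      let maxok := min (fs*fn1) maxps
      let minok := fs*(fn1-1) + 1
      let k := (maxok - minok + 1).toNat
      let st1 := pvPhase n false minok "back" "top_right" "front" "top_left" k (d, cp1, maxok)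
      let st2 := pvPhase n true maxok "front" "top_right" "back" "top_left" k (st1.1, st1.2.1, minok)
      let st3 := pvPhase n false minok "back" "bottom_right" "front" "bottom_left" k (st2.1, st2.2.1, maxok)
      let st4 := pvPhase n true maxok "front" "bottom_right" "back" "bottom_left" k (st3.1, st3.2.1, minok)
      pvOuter n fs maxps fuel st4.1 st4.2.1 fn1
    else d

def make25FoldPageOrder_printfold (n : Int) (folio_size : Int) :
    List (Int × List (String × List (String × Int))) :=
  -- math.ceil(n/8) = -((-n) // 8): exact, float division n/8 is exact for |n| ≤ 2^31
  let maxps := -(PySem.Int.floordiv (-n) 8)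
  -- the init loop inserts fresh increasing keys, so each insertion appends
  let init := (PySem.List.pyRange 1 (maxps+1)).foldl (fun d i => d ++ [(i, pvInitSheet)]) []
  -- A's 'foldgroups'/'num_folios' are computed but never used and are not ported; the slice
  -- step folio_size*8 = 0 there raises ValueError, which Pre_ excludes (folio_size ≠ 0)
  pvOuter n folio_size maxps (n.toNat + 2) init 0 0

-- ===== PORT B =====

def pvPg (n p : Int) : Int := if p ≤ n then p else -1

def pvSheetEntry (n fs maxps s : Int) : PvSheet :=
  let g := PySem.Int.floordiv (s-1) fs
  let lo := fs*g + 1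
  let hi := min (fs*(g+1)) maxps
  let num := hi - lo + 1
  let base := 8*fs*g + 1
  let down := 2*(hi - s)
  let up := 2*(s - lo)
  [("front", [("top_left", pvPg n (base + down + 1)), ("top_right", pvPg n (base + 2*num + up)),
              ("bottom_left", pvPg n (base + 4*num + down + 1)), ("bottom_right", pvPg n (base + 6*num + up))]),
   ("back",  [("top_left", pvPg n (base + 2*num + up + 1)), ("top_right", pvPg n (base + down)),
              ("bottom_left", pvPg n (base + 6*num + up + 1)), ("bottom_right", pvPg n (base + 4*num + down))])]

def make25FoldPageOrder_printfold_alt (n : Int) (folio_size : Int) :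
    List (Int × List (String × List (String × Int))) :=
  let maxps := -(PySem.Int.floordiv (-n) 8)
  (PySem.List.pyRange 1 (maxps+1)).map (fun s => (s, pvSheetEntry n folio_size maxps s))

-- ===== PRECONDITION & SPEC =====

-- Pre_ is exactly where the Python A returns: folio_size = 0 raises ValueError (zero slice step),
-- and folio_size < 0 with n ≥ 1 loops forever.
def Pre_make25FoldPageOrder_printfold (n : Int) (folio_size : Int) : Prop :=
  folio_size ≠ 0 ∧ (n ≤ 0 ∨ 1 ≤ folio_size)
instance (n : Int) (folio_size : Int) : Decidable (Pre_make25FoldPageOrder_printfold n folio_size) := by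
  unfold Pre_make25FoldPageOrder_printfold; infer_instance

def pvWitness_make25FoldPageOrder_printfold : Int × Int := (20, 3)

def Spec_make25FoldPageOrder_printfold (n : Int) (folio_size : Int) (out : List (Int × List (String × List (String × Int)))) : Prop := out = make25FoldPageOrder_printfold_alt n folio_size
instance (n : Int) (folio_size : Int) (out : List (Int × List (String × List (String × Int)))) : Decidable (Spec_make25FoldPageOrder_printfold n folio_size out) := by unfold Spec_make25FoldPageOrder_printfold; infer_instance

-- ===== CLAIM (what is proved, stated in full; the proofs are below) =====
def Claim_equal_make25FoldPageOrder_printfold : Prop := ∀ (n : Int) (folio_size : Int), Dom_make25FoldPageOrder_printfold n folio_size → Pre_make25FoldPageOrder_printfold n folio_size → Spec_make25FoldPageOrder_printfold n folio_size (make25FoldPageOrder_printfold n folio_size)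

-- ===== LEMMAS AND PROOFS =====

-- a write keeps the layout in "map over the key list" form, updating the function pointwise
lemma pvSet_map (ks : List Int) (F : Int → PvSheet) (s0 : Int) (side corner : String) (v : Int) :
    pvSet (ks.map (fun s => (s, F s))) s0 side corner v
      = ks.map (fun s => (s, if s = s0 then pvUpdSheet (F s) side corner v else F s)) := by
  simp only [pvSet, List.map_map]
  refine List.map_congr_left (fun s _ => ?_)
  by_cases h : s = s0 <;> simp [h]

-- a conditional write: what one page of a phase loop does to one sheet
def pvCond (n : Int) (sh : PvSheet) (side corner : String) (p : Int) : PvSheet :=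
  if p ≤ n then pvUpdSheet sh side corner p else sh

-- descending phase loop (sheets s down to bnd, pages c, c+1, c+2, …, stop past n)
lemma pvPhase_desc (n : Int) (s1 c1 s2 c2 : String) (bnd : Int) :
    ∀ (k : Nat) (ks : List Int) (F : Int → PvSheet) (c cp s : Int),
      (k : Int) = s - bnd + 1 → cp = min c (n+1) →
      ∃ sf, pvPhase n false bnd s1 c1 s2 c2 k (ks.map (fun t => (t, F t)), cp, s)
        = (ks.map (fun t => (t, if bnd ≤ t ∧ t ≤ s then
              pvCond n (pvCond n (F t) s1 c1 (c + 2*(s-t))) s2 c2 (c + 2*(s-t) + 1) else F t)),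
           min (c + 2*(k:Int)) (n+1), sf) := by
  intro k
  induction k with
  | zero =>
    intro ks F c cp s hk hcp
    push_cast at hk
    refine ⟨s, ?_⟩
    have hmap : (ks.map (fun t => (t, if bnd ≤ t ∧ t ≤ s then
          pvCond n (pvCond n (F t) s1 c1 (c + 2*(s-t))) s2 c2 (c + 2*(s-t) + 1) else F t)))
        = ks.map (fun t => (t, F t)) :=
      List.map_congr_left (fun t _ => by rw [if_neg (by omega)])
    have hc : min (c + 2*((0:Nat):Int)) (n+1) = cp := by push_cast; omega
    simp only [pvPhase, hmap, hc]
  | succ k ih =>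
    intro ks F c cp s hk hcp
    push_cast at hk
    have hbnd : bnd ≤ s := by omega
    by_cases h1 : n < cp
    · -- page counter already past n: the loop exits immediately
      refine ⟨s, ?_⟩
      have hmap : (ks.map (fun t => (t, if bnd ≤ t ∧ t ≤ s then
            pvCond n (pvCond n (F t) s1 c1 (c + 2*(s-t))) s2 c2 (c + 2*(s-t) + 1) else F t)))
          = ks.map (fun t => (t, F t)) :=
        List.map_congr_left (fun t ht => by
          by_cases hr : bnd ≤ t ∧ t ≤ s
          · rw [if_pos hr]
            have e1 : ¬ (c + 2*(s-t) ≤ n) := by omega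
            have e2 : ¬ (c + 2*(s-t) + 1 ≤ n) := by omega
            simp only [pvCond, if_neg e1, if_neg e2]
          · rw [if_neg hr])
      have hc : min (c + 2*(((k:Int))+1)) (n+1) = cp := by omega
      simp only [pvPhase, if_pos h1, hmap]
      push_cast
      rw [hc, if_pos hbnd]
    · have hcpc : cp = c := by omega
      have hcn : c ≤ n := by omega
      have h1' : ¬ n < c := by omega
      rw [hcpc]
      by_cases h2 : n < c + 1
      · -- exactly one page left: one write, then the break fires
        have hcn' : c = n := by omega
        refine ⟨s, ?_⟩
        have hmap : (ks.map (fun t => (t, if bnd ≤ t ∧ t ≤ s then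
              pvCond n (pvCond n (F t) s1 c1 (c + 2*(s-t))) s2 c2 (c + 2*(s-t) + 1) else F t)))
            = ks.map (fun t => (t, if t = s then pvUpdSheet (F t) s1 c1 c else F t)) :=
          List.map_congr_left (fun t ht => by
            by_cases hts : t = s
            · subst hts
              rw [if_pos ⟨hbnd, le_refl t⟩, if_pos rfl]
              have e0 : c + 2*(t-t) = c := by ring
              rw [e0]
              simp only [pvCond, if_pos hcn, if_neg (show ¬ (c + 1 ≤ n) by omega)]
            · rw [if_neg hts]
              by_cases hr : bnd ≤ t ∧ t ≤ s
              · rw [if_pos hr]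
                simp only [pvCond, if_neg (show ¬ (c + 2*(s-t) ≤ n) by omega),
                  if_neg (show ¬ (c + 2*(s-t) + 1 ≤ n) by omega)]
              · rw [if_neg hr])
        have hc : min (c + 2*(((k:Int))+1)) (n+1) = c + 1 := by omega
        simp only [pvPhase, if_neg h1', if_pos h2, pvSet_map, hmap]
        push_cast
        rw [hc, if_pos hbnd]
      · -- two writes, then continue with the next sheet below
        have hind : ((k:Int)) = (s-1) - bnd + 1 := by omega
        have hcp2 : (c+2 : Int) = min (c+2) (n+1) := by omega
        obtain ⟨sf, heq⟩ := ih ks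
          (fun t => if t = s then pvUpdSheet (pvUpdSheet (F t) s1 c1 c) s2 c2 (c+1) else F t)
          (c+2) (c+2) (s-1) hind hcp2
        refine ⟨sf, ?_⟩
        have hstep : pvSet (ks.map (fun t => (t, if t = s then pvUpdSheet (F t) s1 c1 c else F t))) s s2 c2 (c+1)
            = ks.map (fun t => (t, if t = s then pvUpdSheet (pvUpdSheet (F t) s1 c1 c) s2 c2 (c+1) else F t)) := by
          rw [pvSet_map]
          exact List.map_congr_left (fun t _ => by by_cases hts : t = s <;> simp [hts])
        have hmap : (ks.map (fun t => (t, if bnd ≤ t ∧ t ≤ s - 1 then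
              pvCond n (pvCond n (if t = s then pvUpdSheet (pvUpdSheet (F t) s1 c1 c) s2 c2 (c+1) else F t)
                s1 c1 (c + 2 + 2*(s - 1 - t))) s2 c2 (c + 2 + 2*(s - 1 - t) + 1)
              else (if t = s then pvUpdSheet (pvUpdSheet (F t) s1 c1 c) s2 c2 (c+1) else F t))))
            = ks.map (fun t => (t, if bnd ≤ t ∧ t ≤ s then
              pvCond n (pvCond n (F t) s1 c1 (c + 2*(s-t))) s2 c2 (c + 2*(s-t) + 1) else F t)) :=
          List.map_congr_left (fun t ht => by
            by_cases hts : t = s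
            · subst hts
              rw [if_neg (show ¬ (bnd ≤ t ∧ t ≤ t - 1) by omega), if_pos rfl,
                if_pos ⟨hbnd, le_refl t⟩]
              have e0 : c + 2*(t-t) = c := by ring
              rw [e0]
              simp only [pvCond, if_pos hcn, if_pos (show c + 1 ≤ n by omega)]
            · simp only [if_neg hts]
              by_cases hr : bnd ≤ t ∧ t ≤ s - 1
              · rw [if_pos hr, if_pos (show bnd ≤ t ∧ t ≤ s by omega)]
                have e1 : c + 2 + 2*(s - 1 - t) = c + 2*(s-t) := by ring
                rw [e1]
              · rw [if_neg hr, if_neg (show ¬ (bnd ≤ t ∧ t ≤ s) by omega)])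
        have hc : min (c + 2 + 2*((k:Int))) (n+1) = min (c + 2*(((k:Int))+1)) (n+1) := by omega
        simp only [pvPhase, Bool.false_eq_true, if_false, if_pos hbnd, if_neg h1', if_neg h2]
        rw [pvSet_map, hstep, heq]
        simp only [hmap, hc]
        push_cast
        rfl

-- ascending phase loop (sheets s up to bnd)
lemma pvPhase_asc (n : Int) (s1 c1 s2 c2 : String) (bnd : Int) :
    ∀ (k : Nat) (ks : List Int) (F : Int → PvSheet) (c cp s : Int),
      (k : Int) = bnd - s + 1 → cp = min c (n+1) →
      ∃ sf, pvPhase n true bnd s1 c1 s2 c2 k (ks.map (fun t => (t, F t)), cp, s)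
        = (ks.map (fun t => (t, if s ≤ t ∧ t ≤ bnd then
              pvCond n (pvCond n (F t) s1 c1 (c + 2*(t-s))) s2 c2 (c + 2*(t-s) + 1) else F t)),
           min (c + 2*(k:Int)) (n+1), sf) := by
  intro k
  induction k with
  | zero =>
    intro ks F c cp s hk hcp
    push_cast at hk
    refine ⟨s, ?_⟩
    have hmap : (ks.map (fun t => (t, if s ≤ t ∧ t ≤ bnd then
          pvCond n (pvCond n (F t) s1 c1 (c + 2*(t-s))) s2 c2 (c + 2*(t-s) + 1) else F t)))
        = ks.map (fun t => (t, F t)) :=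
      List.map_congr_left (fun t _ => by rw [if_neg (by omega)])
    have hc : min (c + 2*((0:Nat):Int)) (n+1) = cp := by push_cast; omega
    simp only [pvPhase, hmap, hc]
  | succ k ih =>
    intro ks F c cp s hk hcp
    push_cast at hk
    have hbnd : s ≤ bnd := by omega
    by_cases h1 : n < cp
    · refine ⟨s, ?_⟩
      have hmap : (ks.map (fun t => (t, if s ≤ t ∧ t ≤ bnd then
            pvCond n (pvCond n (F t) s1 c1 (c + 2*(t-s))) s2 c2 (c + 2*(t-s) + 1) else F t)))
          = ks.map (fun t => (t, F t)) :=
        List.map_congr_left (fun t ht => by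
          by_cases hr : s ≤ t ∧ t ≤ bnd
          · rw [if_pos hr]
            have e1 : ¬ (c + 2*(t-s) ≤ n) := by omega
            have e2 : ¬ (c + 2*(t-s) + 1 ≤ n) := by omega
            simp only [pvCond, if_neg e1, if_neg e2]
          · rw [if_neg hr])
      have hc : min (c + 2*(((k:Int))+1)) (n+1) = cp := by omega
      simp only [pvPhase, if_pos h1, hmap]
      push_cast
      rw [hc, if_pos hbnd]
    · have hcpc : cp = c := by omega
      have hcn : c ≤ n := by omega
      have h1' : ¬ n < c := by omega
      rw [hcpc]
      by_cases h2 : n < c + 1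
      · have hcn' : c = n := by omega
        refine ⟨s, ?_⟩
        have hmap : (ks.map (fun t => (t, if s ≤ t ∧ t ≤ bnd then
              pvCond n (pvCond n (F t) s1 c1 (c + 2*(t-s))) s2 c2 (c + 2*(t-s) + 1) else F t)))
            = ks.map (fun t => (t, if t = s then pvUpdSheet (F t) s1 c1 c else F t)) :=
          List.map_congr_left (fun t ht => by
            by_cases hts : t = s
            · subst hts
              rw [if_pos ⟨le_refl t, hbnd⟩, if_pos rfl]
              have e0 : c + 2*(t-t) = c := by ring
              rw [e0]
              simp only [pvCond, if_pos hcn, if_neg (show ¬ (c + 1 ≤ n) by omega)]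
            · rw [if_neg hts]
              by_cases hr : s ≤ t ∧ t ≤ bnd
              · rw [if_pos hr]
                simp only [pvCond, if_neg (show ¬ (c + 2*(t-s) ≤ n) by omega),
                  if_neg (show ¬ (c + 2*(t-s) + 1 ≤ n) by omega)]
              · rw [if_neg hr])
        have hc : min (c + 2*(((k:Int))+1)) (n+1) = c + 1 := by omega
        simp only [pvPhase, if_neg h1', if_pos h2, pvSet_map, hmap]
        push_cast
        rw [hc, if_pos hbnd]
      · have hind : ((k:Int)) = bnd - (s+1) + 1 := by omega
        have hcp2 : (c+2 : Int) = min (c+2) (n+1) := by omega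
        obtain ⟨sf, heq⟩ := ih ks
          (fun t => if t = s then pvUpdSheet (pvUpdSheet (F t) s1 c1 c) s2 c2 (c+1) else F t)
          (c+2) (c+2) (s+1) hind hcp2
        refine ⟨sf, ?_⟩
        have hstep : pvSet (ks.map (fun t => (t, if t = s then pvUpdSheet (F t) s1 c1 c else F t))) s s2 c2 (c+1)
            = ks.map (fun t => (t, if t = s then pvUpdSheet (pvUpdSheet (F t) s1 c1 c) s2 c2 (c+1) else F t)) := by
          rw [pvSet_map]
          exact List.map_congr_left (fun t _ => by by_cases hts : t = s <;> simp [hts])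
        have hmap : (ks.map (fun t => (t, if s + 1 ≤ t ∧ t ≤ bnd then
              pvCond n (pvCond n (if t = s then pvUpdSheet (pvUpdSheet (F t) s1 c1 c) s2 c2 (c+1) else F t)
                s1 c1 (c + 2 + 2*(t - (s + 1)))) s2 c2 (c + 2 + 2*(t - (s + 1)) + 1)
              else (if t = s then pvUpdSheet (pvUpdSheet (F t) s1 c1 c) s2 c2 (c+1) else F t))))
            = ks.map (fun t => (t, if s ≤ t ∧ t ≤ bnd then
              pvCond n (pvCond n (F t) s1 c1 (c + 2*(t-s))) s2 c2 (c + 2*(t-s) + 1) else F t)) :=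
          List.map_congr_left (fun t ht => by
            by_cases hts : t = s
            · subst hts
              rw [if_neg (show ¬ (t + 1 ≤ t ∧ t ≤ bnd) by omega), if_pos rfl,
                if_pos ⟨le_refl t, hbnd⟩]
              have e0 : c + 2*(t-t) = c := by ring
              rw [e0]
              simp only [pvCond, if_pos hcn, if_pos (show c + 1 ≤ n by omega)]
            · simp only [if_neg hts]
              by_cases hr : s + 1 ≤ t ∧ t ≤ bnd
              · rw [if_pos hr, if_pos (show s ≤ t ∧ t ≤ bnd by omega)]
                have e1 : c + 2 + 2*(t - (s + 1)) = c + 2*(t-s) := by ring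
                rw [e1]
              · rw [if_neg hr, if_neg (show ¬ (s ≤ t ∧ t ≤ bnd) by omega)])
        have hc : min (c + 2 + 2*((k:Int))) (n+1) = min (c + 2*(((k:Int))+1)) (n+1) := by omega
        simp only [pvPhase, if_true, if_pos hbnd, if_neg h1', if_neg h2]
        rw [pvSet_map, hstep, heq]
        simp only [hmap, hc]
        push_cast
        rfl

lemma pvPg_neg (n p : Int) (h : n < p) : pvPg n p = -1 := by
  simp [pvPg]; omega

lemma pvCond_front_top_left (n p a2 a3 a4 b1 b2 b3 b4 : Int) :
    pvCond n [("front", [("top_left", -1), ("top_right", a2), ("bottom_left", a3), ("bottom_right", a4)]),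
       ("back", [("top_left", b1), ("top_right", b2), ("bottom_left", b3), ("bottom_right", b4)])] "front" "top_left" p
    = [("front", [("top_left", pvPg n p), ("top_right", a2), ("bottom_left", a3), ("bottom_right", a4)]),
       ("back", [("top_left", b1), ("top_right", b2), ("bottom_left", b3), ("bottom_right", b4)])] := by
  unfold pvCond pvPg
  split_ifs with h <;> rfl

lemma pvCond_front_top_right (n p a1 a3 a4 b1 b2 b3 b4 : Int) :
    pvCond n [("front", [("top_left", a1), ("top_right", -1), ("bottom_left", a3), ("bottom_right", a4)]),
       ("back", [("top_left", b1), ("top_right", b2), ("bottom_left", b3), ("bottom_right", b4)])] "front" "top_right" p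
    = [("front", [("top_left", a1), ("top_right", pvPg n p), ("bottom_left", a3), ("bottom_right", a4)]),
       ("back", [("top_left", b1), ("top_right", b2), ("bottom_left", b3), ("bottom_right", b4)])] := by
  unfold pvCond pvPg
  split_ifs with h <;> rfl

lemma pvCond_front_bottom_left (n p a1 a2 a4 b1 b2 b3 b4 : Int) :
    pvCond n [("front", [("top_left", a1), ("top_right", a2), ("bottom_left", -1), ("bottom_right", a4)]),
       ("back", [("top_left", b1), ("top_right", b2), ("bottom_left", b3), ("bottom_right", b4)])] "front" "bottom_left" p
    = [("front", [("top_left", a1), ("top_right", a2), ("bottom_left", pvPg n p), ("bottom_right", a4)]),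
       ("back", [("top_left", b1), ("top_right", b2), ("bottom_left", b3), ("bottom_right", b4)])] := by
  unfold pvCond pvPg
  split_ifs with h <;> rfl

lemma pvCond_front_bottom_right (n p a1 a2 a3 b1 b2 b3 b4 : Int) :
    pvCond n [("front", [("top_left", a1), ("top_right", a2), ("bottom_left", a3), ("bottom_right", -1)]),
       ("back", [("top_left", b1), ("top_right", b2), ("bottom_left", b3), ("bottom_right", b4)])] "front" "bottom_right" p
    = [("front", [("top_left", a1), ("top_right", a2), ("bottom_left", a3), ("bottom_right", pvPg n p)]),
       ("back", [("top_left", b1), ("top_right", b2), ("bottom_left", b3), ("bottom_right", b4)])] := by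
  unfold pvCond pvPg
  split_ifs with h <;> rfl

lemma pvCond_back_top_left (n p a1 a2 a3 a4 b2 b3 b4 : Int) :
    pvCond n [("front", [("top_left", a1), ("top_right", a2), ("bottom_left", a3), ("bottom_right", a4)]),
       ("back", [("top_left", -1), ("top_right", b2), ("bottom_left", b3), ("bottom_right", b4)])] "back" "top_left" p
    = [("front", [("top_left", a1), ("top_right", a2), ("bottom_left", a3), ("bottom_right", a4)]),
       ("back", [("top_left", pvPg n p), ("top_right", b2), ("bottom_left", b3), ("bottom_right", b4)])] := by
  unfold pvCond pvPg
  split_ifs with h <;> rfl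

lemma pvCond_back_top_right (n p a1 a2 a3 a4 b1 b3 b4 : Int) :
    pvCond n [("front", [("top_left", a1), ("top_right", a2), ("bottom_left", a3), ("bottom_right", a4)]),
       ("back", [("top_left", b1), ("top_right", -1), ("bottom_left", b3), ("bottom_right", b4)])] "back" "top_right" p
    = [("front", [("top_left", a1), ("top_right", a2), ("bottom_left", a3), ("bottom_right", a4)]),
       ("back", [("top_left", b1), ("top_right", pvPg n p), ("bottom_left", b3), ("bottom_right", b4)])] := by
  unfold pvCond pvPg
  split_ifs with h <;> rfl

lemma pvCond_back_bottom_left (n p a1 a2 a3 a4 b1 b2 b4 : Int) :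
    pvCond n [("front", [("top_left", a1), ("top_right", a2), ("bottom_left", a3), ("bottom_right", a4)]),
       ("back", [("top_left", b1), ("top_right", b2), ("bottom_left", -1), ("bottom_right", b4)])] "back" "bottom_left" p
    = [("front", [("top_left", a1), ("top_right", a2), ("bottom_left", a3), ("bottom_right", a4)]),
       ("back", [("top_left", b1), ("top_right", b2), ("bottom_left", pvPg n p), ("bottom_right", b4)])] := by
  unfold pvCond pvPg
  split_ifs with h <;> rfl

lemma pvCond_back_bottom_right (n p a1 a2 a3 a4 b1 b2 b3 : Int) :
    pvCond n [("front", [("top_left", a1), ("top_right", a2), ("bottom_left", a3), ("bottom_right", a4)]),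
       ("back", [("top_left", b1), ("top_right", b2), ("bottom_left", b3), ("bottom_right", -1)])] "back" "bottom_right" p
    = [("front", [("top_left", a1), ("top_right", a2), ("bottom_left", a3), ("bottom_right", a4)]),
       ("back", [("top_left", b1), ("top_right", b2), ("bottom_left", b3), ("bottom_right", pvPg n p)])] := by
  unfold pvCond pvPg
  split_ifs with h <;> rfl

-- the eight conditional writes of one fold group on a fresh sheet, in A's order
lemma pvChain_entry (n q1 q2 q3 q4 : Int) :
    pvCond n (pvCond n (pvCond n (pvCond n (pvCond n (pvCond n (pvCond n (pvCond n pvInitSheet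
        "back" "top_right" q1)
        "front" "top_left" (q1 + 1))
        "front" "top_right" q2)
        "back" "top_left" (q2 + 1))
        "back" "bottom_right" q3)
        "front" "bottom_left" (q3 + 1))
        "front" "bottom_right" q4)
        "back" "bottom_left" (q4 + 1)
    = [("front", [("top_left", pvPg n (q1 + 1)), ("top_right", pvPg n q2),
                  ("bottom_left", pvPg n (q3 + 1)), ("bottom_right", pvPg n q4)]),
       ("back", [("top_left", pvPg n (q2 + 1)), ("top_right", pvPg n q1),
                 ("bottom_left", pvPg n (q4 + 1)), ("bottom_right", pvPg n q3)])] := by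
  have h0 : pvInitSheet = [("front", [("top_left", (-1:Int)), ("top_right", (-1:Int)), ("bottom_left", (-1:Int)), ("bottom_right", (-1:Int))]),
       ("back", [("top_left", (-1:Int)), ("top_right", (-1:Int)), ("bottom_left", (-1:Int)), ("bottom_right", (-1:Int))])] := rfl
  rw [h0, pvCond_back_top_right, pvCond_front_top_left, pvCond_front_top_right,
    pvCond_back_top_left, pvCond_back_bottom_right, pvCond_front_bottom_left,
    pvCond_front_bottom_right, pvCond_back_bottom_left]

-- two sheets of pvPg slots with numerically equal pages are equal
lemma pvSheet_lit_congr (n x1 x2 x3 x4 x5 x6 x7 x8 y1 y2 y3 y4 y5 y6 y7 y8 : Int)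
    (h1 : x1 = y1) (h2 : x2 = y2) (h3 : x3 = y3) (h4 : x4 = y4)
    (h5 : x5 = y5) (h6 : x6 = y6) (h7 : x7 = y7) (h8 : x8 = y8) :
    ([("front", [("top_left", pvPg n x1), ("top_right", pvPg n x2),
                 ("bottom_left", pvPg n x3), ("bottom_right", pvPg n x4)]),
      ("back", [("top_left", pvPg n x5), ("top_right", pvPg n x6),
                ("bottom_left", pvPg n x7), ("bottom_right", pvPg n x8)])] : PvSheet)
    = [("front", [("top_left", pvPg n y1), ("top_right", pvPg n y2),
                  ("bottom_left", pvPg n y3), ("bottom_right", pvPg n y4)]),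
       ("back", [("top_left", pvPg n y5), ("top_right", pvPg n y6),
                 ("bottom_left", pvPg n y7), ("bottom_right", pvPg n y8)])] := by
  subst h1 h2 h3 h4 h5 h6 h7 h8; rfl

-- a sheet all of whose pages lie past n is the fresh sheet
lemma pvSheet_lit_init (n x1 x2 x3 x4 x5 x6 x7 x8 : Int)
    (h1 : n < x1) (h2 : n < x2) (h3 : n < x3) (h4 : n < x4)
    (h5 : n < x5) (h6 : n < x6) (h7 : n < x7) (h8 : n < x8) :
    ([("front", [("top_left", pvPg n x1), ("top_right", pvPg n x2),
                 ("bottom_left", pvPg n x3), ("bottom_right", pvPg n x4)]),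
      ("back", [("top_left", pvPg n x5), ("top_right", pvPg n x6),
                ("bottom_left", pvPg n x7), ("bottom_right", pvPg n x8)])] : PvSheet)
    = pvInitSheet := by
  rw [pvPg_neg n x1 h1, pvPg_neg n x2 h2, pvPg_neg n x3 h3, pvPg_neg n x4 h4,
    pvPg_neg n x5 h5, pvPg_neg n x6 h6, pvPg_neg n x7 h7, pvPg_neg n x8 h8]
  rfl

-- B's entry, unfolded, for a sheet t of fold group g (fs ≥ 1)
lemma pvSheetEntry_eq (n fs M g t : Int) (hfs : 1 ≤ fs)
    (hlo : fs*g + 1 ≤ t) (hhi : t ≤ fs*(g+1)) :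
    pvSheetEntry n fs M t =
      [("front", [("top_left", pvPg n (8*fs*g + 1 + 2*(min (fs*(g+1)) M - t) + 1)),
                  ("top_right", pvPg n (8*fs*g + 1 + 2*(min (fs*(g+1)) M - (fs*g + 1) + 1) + 2*(t - (fs*g + 1)))),
                  ("bottom_left", pvPg n (8*fs*g + 1 + 4*(min (fs*(g+1)) M - (fs*g + 1) + 1) + 2*(min (fs*(g+1)) M - t) + 1)),
                  ("bottom_right", pvPg n (8*fs*g + 1 + 6*(min (fs*(g+1)) M - (fs*g + 1) + 1) + 2*(t - (fs*g + 1))))]),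
       ("back", [("top_left", pvPg n (8*fs*g + 1 + 2*(min (fs*(g+1)) M - (fs*g + 1) + 1) + 2*(t - (fs*g + 1)) + 1)),
                 ("top_right", pvPg n (8*fs*g + 1 + 2*(min (fs*(g+1)) M - t))),
                 ("bottom_left", pvPg n (8*fs*g + 1 + 6*(min (fs*(g+1)) M - (fs*g + 1) + 1) + 2*(t - (fs*g + 1)) + 1)),
                 ("bottom_right", pvPg n (8*fs*g + 1 + 4*(min (fs*(g+1)) M - (fs*g + 1) + 1) + 2*(min (fs*(g+1)) M - t)))])] := by
  have hg : PySem.Int.floordiv (t-1) fs = g := by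
    rw [PySem.Int.floordiv_eq_iff_of_pos (by omega)]
    constructor
    · rw [mul_comm]; omega
    · rw [mul_comm]; omega
  simp only [pvSheetEntry, hg]

-- a sheet whose whole fold group starts past page n keeps its initial -1 entries
lemma pvSheetEntry_init (n fs M t : Int) (hfs : 1 ≤ fs) (htM : t ≤ M)
    (h : n < 8*fs*(PySem.Int.floordiv (t-1) fs) + 1) :
    pvSheetEntry n fs M t = pvInitSheet := by
  have hpos : (0:Int) < fs := by omega
  obtain ⟨hq1, hq2⟩ := (PySem.Int.floordiv_eq_iff_of_pos hpos).mp
    (rfl : PySem.Int.floordiv (t-1) fs = PySem.Int.floordiv (t-1) fs)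
  rw [mul_comm] at hq1 hq2
  have e8 : 8*fs*(PySem.Int.floordiv (t-1) fs) = 8*(fs*(PySem.Int.floordiv (t-1) fs)) := by ring
  rw [e8] at h
  rw [pvSheetEntry_eq n fs M (PySem.Int.floordiv (t-1) fs) t hfs (by omega) (by omega)]
  have e8' : 8*fs*(PySem.Int.floordiv (t-1) fs) = 8*(fs*(PySem.Int.floordiv (t-1) fs)) := e8
  apply pvSheet_lit_init <;> · rw [e8']; omega

-- named forms of what one phase does to the per-sheet function (proof-side only)
def pvDescF (n bnd s c : Int) (s1 c1 s2 c2 : String) (F : Int → PvSheet) : Int → PvSheet :=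
  fun t => if bnd ≤ t ∧ t ≤ s then
    pvCond n (pvCond n (F t) s1 c1 (c + 2*(s-t))) s2 c2 (c + 2*(s-t) + 1) else F t

def pvAscF (n bnd s c : Int) (s1 c1 s2 c2 : String) (F : Int → PvSheet) : Int → PvSheet :=
  fun t => if s ≤ t ∧ t ≤ bnd then
    pvCond n (pvCond n (F t) s1 c1 (c + 2*(t-s))) s2 c2 (c + 2*(t-s) + 1) else F t

lemma pvPhase_descF (n : Int) (s1 c1 s2 c2 : String) (bnd : Int) (k : Nat) (ks : List Int)
    (F : Int → PvSheet) (c cp s : Int) (hk : (k : Int) = s - bnd + 1) (hcp : cp = min c (n+1)) :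
    ∃ sf, pvPhase n false bnd s1 c1 s2 c2 k (ks.map (fun t => (t, F t)), cp, s)
      = (ks.map (fun t => (t, pvDescF n bnd s c s1 c1 s2 c2 F t)), min (c + 2*(k:Int)) (n+1), sf) := by
  obtain ⟨sf, h⟩ := pvPhase_desc n s1 c1 s2 c2 bnd k ks F c cp s hk hcp
  exact ⟨sf, by simpa only [pvDescF] using h⟩

lemma pvPhase_ascF (n : Int) (s1 c1 s2 c2 : String) (bnd : Int) (k : Nat) (ks : List Int)
    (F : Int → PvSheet) (c cp s : Int) (hk : (k : Int) = bnd - s + 1) (hcp : cp = min c (n+1)) :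
    ∃ sf, pvPhase n true bnd s1 c1 s2 c2 k (ks.map (fun t => (t, F t)), cp, s)
      = (ks.map (fun t => (t, pvAscF n bnd s c s1 c1 s2 c2 F t)), min (c + 2*(k:Int)) (n+1), sf) := by
  obtain ⟨sf, h⟩ := pvPhase_asc n s1 c1 s2 c2 bnd k ks F c cp s hk hcp
  exact ⟨sf, by simpa only [pvAscF] using h⟩

-- on the empty layout every phase and the whole outer loop are inert
lemma pvPhase_nil (n : Int) (asc : Bool) (bnd : Int) (s1 c1 s2 c2 : String) :
    ∀ (k : Nat) (cp s : Int), ∃ cp' s',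
      pvPhase n asc bnd s1 c1 s2 c2 k ([], cp, s) = ([], cp', s') := by
  intro k
  induction k with
  | zero => intro cp s; exact ⟨cp, s, rfl⟩
  | succ k ih =>
    intro cp s
    by_cases hc : (if asc then s ≤ bnd else bnd ≤ s)
    · by_cases h1 : n < cp
      · exact ⟨cp, s, by simp only [pvPhase, if_pos hc, if_pos h1]⟩
      · by_cases h2 : n < cp + 1
        · exact ⟨cp + 1, s, by simp only [pvPhase, if_pos hc, if_neg h1, if_pos h2, pvSet]; rfl⟩
        · obtain ⟨cp', s', h⟩ := ih (cp + 2) (if asc then s + 1 else s - 1)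
          refine ⟨cp', s', ?_⟩
          simp only [pvPhase, if_pos hc, if_neg h1, if_neg h2, pvSet, List.map_nil]
          exact h
    · exact ⟨cp, s, by simp only [pvPhase, if_neg hc]⟩

lemma pvOuter_nil (n fs M : Int) :
    ∀ (fuel : Nat) (cp fn : Int), pvOuter n fs M fuel [] cp fn = [] := by
  intro fuel
  induction fuel with
  | zero => intro cp fn; rfl
  | succ fuel ih =>
    intro cp fn
    by_cases hc : cp ≤ n
    · simp only [pvOuter, if_pos hc]
      obtain ⟨c1, s1', e1⟩ := pvPhase_nil n false (fs*(fn+1-1)+1) "back" "top_right" "front" "top_left" _ _ _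
      rw [e1]; dsimp only
      obtain ⟨c2, s2', e2⟩ := pvPhase_nil n true (min (fs*(fn+1)) M) "front" "top_right" "back" "top_left" _ _ _
      rw [e2]; dsimp only
      obtain ⟨c3, s3', e3⟩ := pvPhase_nil n false (fs*(fn+1-1)+1) "back" "bottom_right" "front" "bottom_left" _ _ _
      rw [e3]; dsimp only
      obtain ⟨c4, s4', e4⟩ := pvPhase_nil n true (min (fs*(fn+1)) M) "front" "bottom_right" "back" "bottom_left" _ _ _
      rw [e4]; dsimp only
      exact ih _ _
    · simp only [pvOuter, if_neg hc]

-- the outer loop never runs out of fuel and finishes every remaining fold group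
lemma pvOuter_run (n fs M : Int) (hfs : 1 ≤ fs)
    (hM : M = -(PySem.Int.floordiv (-n) 8)) (ks : List Int)
    (hks : ∀ t ∈ ks, 1 ≤ t ∧ t ≤ M) :
    ∀ (fuel : Nat) (g cp : Int) (F : Int → PvSheet),
      0 ≤ g →
      (cp ≤ n ↔ 8*fs*g + 1 ≤ n) →
      (n - 8*fs*g).toNat + 1 ≤ fuel →
      (∀ t, 1 ≤ t → t ≤ M →
        (fs*g < t → F t = pvInitSheet) ∧ (t ≤ fs*g → F t = pvSheetEntry n fs M t)) →
      pvOuter n fs M fuel (ks.map (fun t => (t, F t))) cp g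
        = ks.map (fun t => (t, pvSheetEntry n fs M t)) := by
  have hM8 : 8*M - 8 < n ∧ n ≤ 8*M := by
    have h := (PySem.Int.neg_floordiv_neg_eq_iff_of_pos (a := n) (b := 8) (by norm_num)).mp hM.symm
    omega
  intro fuel
  induction fuel with
  | zero => intro g cp F hg hiff hfuel hinv; omega
  | succ fuel ih =>
    intro g cp F hg hiff hfuel hinv
    have eg : 8*fs*g = 8*(fs*g) := by ring
    have eg1 : 8*fs*(g+1) = 8*(fs*(g+1)) := by ring
    have eB : fs*(g+1) = fs*g + fs := by ring
    by_cases hcp : cp ≤ n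
    · -- one more fold group is processed
      have hbase : 8*fs*g + 1 ≤ n := hiff.mp hcp
      have hgM : fs*g + 1 ≤ M := by omega
      have hkI : ((min (fs*(g+1)) M - (fs*g + 1) + 1).toNat : Int)
          = min (fs*(g+1)) M - (fs*g + 1) + 1 := by omega
      simp only [pvOuter, if_pos hcp, add_sub_cancel_right]
      obtain ⟨sf1, h1⟩ := pvPhase_descF n "back" "top_right" "front" "top_left"
        (fs*g + 1) ((min (fs*(g+1)) M - (fs*g + 1) + 1).toNat) ks F
        (8*fs*g + 1) (8*fs*g + 1) (min (fs*(g+1)) M) (by omega) (by omega)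
      rw [h1]; dsimp only
      obtain ⟨sf2, h2⟩ := pvPhase_ascF n "front" "top_right" "back" "top_left"
        (min (fs*(g+1)) M) ((min (fs*(g+1)) M - (fs*g + 1) + 1).toNat) ks
        (pvDescF n (fs*g + 1) (min (fs*(g+1)) M) (8*fs*g + 1) "back" "top_right" "front" "top_left" F)
        (8*fs*g + 1 + 2*(((min (fs*(g+1)) M - (fs*g + 1) + 1).toNat : Int))) _ (fs*g + 1) (by omega) rfl
      rw [h2]; dsimp only
      obtain ⟨sf3, h3⟩ := pvPhase_descF n "back" "bottom_right" "front" "bottom_left"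
        (fs*g + 1) ((min (fs*(g+1)) M - (fs*g + 1) + 1).toNat) ks
        (pvAscF n (min (fs*(g+1)) M) (fs*g + 1)
          (8*fs*g + 1 + 2*(((min (fs*(g+1)) M - (fs*g + 1) + 1).toNat : Int))) "front" "top_right" "back" "top_left"
          (pvDescF n (fs*g + 1) (min (fs*(g+1)) M) (8*fs*g + 1) "back" "top_right" "front" "top_left" F))
        (8*fs*g + 1 + 2*(((min (fs*(g+1)) M - (fs*g + 1) + 1).toNat : Int))
          + 2*(((min (fs*(g+1)) M - (fs*g + 1) + 1).toNat : Int))) _ (min (fs*(g+1)) M) (by omega) rfl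
      rw [h3]; dsimp only
      obtain ⟨sf4, h4⟩ := pvPhase_ascF n "front" "bottom_right" "back" "bottom_left"
        (min (fs*(g+1)) M) ((min (fs*(g+1)) M - (fs*g + 1) + 1).toNat) ks
        (pvDescF n (fs*g + 1) (min (fs*(g+1)) M)
          (8*fs*g + 1 + 2*(((min (fs*(g+1)) M - (fs*g + 1) + 1).toNat : Int))
            + 2*(((min (fs*(g+1)) M - (fs*g + 1) + 1).toNat : Int))) "back" "bottom_right" "front" "bottom_left"
          (pvAscF n (min (fs*(g+1)) M) (fs*g + 1)
            (8*fs*g + 1 + 2*(((min (fs*(g+1)) M - (fs*g + 1) + 1).toNat : Int))) "front" "top_right" "back" "top_left"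
            (pvDescF n (fs*g + 1) (min (fs*(g+1)) M) (8*fs*g + 1) "back" "top_right" "front" "top_left" F)))
        (8*fs*g + 1 + 2*(((min (fs*(g+1)) M - (fs*g + 1) + 1).toNat : Int))
          + 2*(((min (fs*(g+1)) M - (fs*g + 1) + 1).toNat : Int))
          + 2*(((min (fs*(g+1)) M - (fs*g + 1) + 1).toNat : Int))) _ (fs*g + 1) (by omega) rfl
      rw [h4]; dsimp only
      apply ih (g+1) _ _ (by omega)
      · constructor
        · intro h; omega
        · intro h; omega
      · omega
      · -- the invariant advances one fold group
        intro t ht1 htM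
        by_cases hrange : fs*g + 1 ≤ t ∧ t ≤ min (fs*(g+1)) M
        · have hFt : F t = pvInitSheet := (hinv t ht1 htM).1 (by omega)
          have hval : (pvAscF n (min (fs*(g+1)) M) (fs*g + 1) (8*fs*g + 1 + 2*(((min (fs*(g+1)) M - (fs*g + 1) + 1).toNat : Int)) + 2*(((min (fs*(g+1)) M - (fs*g + 1) + 1).toNat : Int)) + 2*(((min (fs*(g+1)) M - (fs*g + 1) + 1).toNat : Int))) "front" "bottom_right" "back" "bottom_left"
              (pvDescF n (fs*g + 1) (min (fs*(g+1)) M) (8*fs*g + 1 + 2*(((min (fs*(g+1)) M - (fs*g + 1) + 1).toNat : Int)) + 2*(((min (fs*(g+1)) M - (fs*g + 1) + 1).toNat : Int))) "back" "bottom_right" "front" "bottom_left"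
              (pvAscF n (min (fs*(g+1)) M) (fs*g + 1) (8*fs*g + 1 + 2*(((min (fs*(g+1)) M - (fs*g + 1) + 1).toNat : Int))) "front" "top_right" "back" "top_left"
              (pvDescF n (fs*g + 1) (min (fs*(g+1)) M) (8*fs*g + 1) "back" "top_right" "front" "top_left" F)))) t
              = pvSheetEntry n fs M t := by
            simp only [pvAscF, pvDescF, if_pos hrange, hFt, pvChain_entry]
            rw [pvSheetEntry_eq n fs M g t hfs (by omega) (by omega)]
            apply pvSheet_lit_congr <;> omega
          exact ⟨fun h => absurd (by omega : t ≤ min (fs*(g+1)) M ∧ fs*(g+1) < t) (by omega),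
                 fun _ => hval⟩
        · have hsame : (pvAscF n (min (fs*(g+1)) M) (fs*g + 1) (8*fs*g + 1 + 2*(((min (fs*(g+1)) M - (fs*g + 1) + 1).toNat : Int)) + 2*(((min (fs*(g+1)) M - (fs*g + 1) + 1).toNat : Int)) + 2*(((min (fs*(g+1)) M - (fs*g + 1) + 1).toNat : Int))) "front" "bottom_right" "back" "bottom_left"
              (pvDescF n (fs*g + 1) (min (fs*(g+1)) M) (8*fs*g + 1 + 2*(((min (fs*(g+1)) M - (fs*g + 1) + 1).toNat : Int)) + 2*(((min (fs*(g+1)) M - (fs*g + 1) + 1).toNat : Int))) "back" "bottom_right" "front" "bottom_left"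
              (pvAscF n (min (fs*(g+1)) M) (fs*g + 1) (8*fs*g + 1 + 2*(((min (fs*(g+1)) M - (fs*g + 1) + 1).toNat : Int))) "front" "top_right" "back" "top_left"
              (pvDescF n (fs*g + 1) (min (fs*(g+1)) M) (8*fs*g + 1) "back" "top_right" "front" "top_left" F)))) t
              = F t := by
            simp only [pvAscF, pvDescF, if_neg hrange]
          rw [hsame]
          constructor
          · intro h; exact (hinv t ht1 htM).1 (by omega)
          · intro h; exact (hinv t ht1 htM).2 (by omega)
    · -- the loop exits: everything still fresh has a fresh closed-form entry too
      have hb : ¬ (8*fs*g + 1 ≤ n) := fun h => hcp (hiff.mpr h)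
      have hexit : pvOuter n fs M (fuel+1) (ks.map (fun t => (t, F t))) cp g
          = ks.map (fun t => (t, F t)) := by
        simp only [pvOuter, if_neg hcp]
      rw [hexit]
      refine List.map_congr_left (fun t ht => ?_)
      obtain ⟨ht1, htM⟩ := hks t ht
      by_cases hle : t ≤ fs*g
      · rw [(hinv t ht1 htM).2 hle]
      · have hq : g ≤ PySem.Int.floordiv (t-1) fs :=
          (PySem.Int.le_floordiv_iff_mul_le (by omega)).mpr (by rw [mul_comm]; omega)
        have hqq : fs*g ≤ fs*(PySem.Int.floordiv (t-1) fs) :=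
          mul_le_mul_of_nonneg_left hq (by omega : (0:Int) ≤ fs)
        have eq' : 8*fs*(PySem.Int.floordiv (t-1) fs)
            = 8*(fs*(PySem.Int.floordiv (t-1) fs)) := by ring
        rw [(hinv t ht1 htM).1 (by omega),
          pvSheetEntry_init n fs M t hfs htM (by omega)]

-- ===== VERDICT (by name: the statement is the Claim_ definition above) =====
theorem make25FoldPageOrder_printfold_spec : Claim_equal_make25FoldPageOrder_printfold := by
  unfold Claim_equal_make25FoldPageOrder_printfold
  intro n fs _ hpre
  obtain ⟨hfs0, hpre2⟩ := hpre
  unfold Spec_make25FoldPageOrder_printfold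
  simp only [make25FoldPageOrder_printfold, make25FoldPageOrder_printfold_alt]
  rw [PySem.List.foldl_append_singleton_eq_map (fun i => (i, pvInitSheet))
    (PySem.List.pyRange 1 (-(PySem.Int.floordiv (-n) 8) + 1)) [], List.nil_append]
  by_cases hn : 1 ≤ n
  · have hfs : 1 ≤ fs := by
      rcases hpre2 with h | h
      · omega
      · exact h
    have e0 : 8*fs*0 = 0 := by ring
    have e0' : fs*0 = 0 := by ring
    exact pvOuter_run n fs _ hfs rfl _
      (fun t ht => by
        have h := PySem.List.mem_pyRange_one.mp ht
        exact ⟨h.1, by omega⟩)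
      (n.toNat + 2) 0 0 (fun _ => pvInitSheet) le_rfl
      (by constructor <;> intro <;> omega)
      (by omega)
      (fun t _ htM => ⟨fun _ => rfl, fun h => by exfalso; omega⟩)
  · -- n ≤ 0: no printsheets, both sides are the empty dict
    have hM8 : 8*(-(PySem.Int.floordiv (-n) 8)) - 8 < n ∧ n ≤ 8*(-(PySem.Int.floordiv (-n) 8)) := by
      have h := (PySem.Int.neg_floordiv_neg_eq_iff_of_pos (a := n) (b := 8) (by norm_num)).mp rfl
      omega
    rw [PySem.List.pyRange_one_eq_nil (by omega : -(PySem.Int.floordiv (-n) 8) + 1 ≤ 1)]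
    simp only [List.map_nil]
    exact pvOuter_nil n fs _ _ 0 0
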